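-- pv_equiv track=rewrite | github.com/benjaminMancilla/BLOCON | app/src/model/eventsourcing/service.py | _normalize_children_order
-- ===== SOURCE A (Python) =====
-- def _normalize_children_order(
--     children_order: list[str] | None,
--     current_children: list[str],
-- ) -> list[str] | None:
--     if children_order is None or not isinstance(children_order, list):
--         return None
--
--     seen: set[str] = set()
--     ordered: list[str] = []
--     for child_id in children_order:
--         if child_id in current_children and child_id not in seen:
--             ordered.append(child_id)
--             seen.add(child_id)
--
--     for child_id in current_children:
--         if child_id not in seen:
--             ordered.append(child_id)
--             seen.add(child_id)
--
--     if len(ordered) != len(current_children):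
--         return None
--
--     return ordered
-- ===== SOURCE B (Python) =====
-- def _normalize_children_order(
--     children_order: list[str] | None,
--     current_children: list[str],
-- ) -> list[str] | None:
--     if children_order is None or not isinstance(children_order, list):
--         return None
--
--     if len(set(current_children)) != len(current_children):
--         return None
--
--     pos: dict[str, int] = {}
--     for cid in children_order:
--         pos.setdefault(cid, len(pos))
--     for cid in current_children:
--         pos.setdefault(cid, len(pos))
--
--     return sorted(current_children, key=lambda c: pos[c])
-- ===== Notes on version B (the rewrite author's own statement) =====
-- stated objective: alternative
-- what changed: Replaces A's two seen-set filtering passes with threaded state and a final length check by an up-front set-cardinality duplicate check, a first-occurrence rank dictionary built with setdefault, and one stable sort of current_children by rank.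
import Mathlib
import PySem

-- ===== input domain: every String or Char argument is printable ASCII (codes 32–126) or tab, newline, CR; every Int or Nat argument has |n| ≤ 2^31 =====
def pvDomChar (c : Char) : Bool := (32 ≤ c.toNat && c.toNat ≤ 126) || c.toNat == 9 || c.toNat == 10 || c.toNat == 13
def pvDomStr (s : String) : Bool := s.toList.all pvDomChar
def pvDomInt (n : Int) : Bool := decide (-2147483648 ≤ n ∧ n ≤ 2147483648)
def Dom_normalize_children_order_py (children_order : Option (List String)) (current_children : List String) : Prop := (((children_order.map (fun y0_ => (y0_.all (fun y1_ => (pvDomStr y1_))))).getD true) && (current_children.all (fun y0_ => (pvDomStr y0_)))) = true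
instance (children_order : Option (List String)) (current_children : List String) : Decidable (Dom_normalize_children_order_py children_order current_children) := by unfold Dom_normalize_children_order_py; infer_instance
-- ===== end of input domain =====

-- B replaces A's two seen-set filtering passes and final length check by a duplicate check plus
-- one stable sort of current_children under a first-occurrence rank table (idiomatic/alternative).

-- ===== PORT A =====
def normalize_children_order_py (children_order : Option (List String)) (current_children : List String) : Option (List String) :=
  match children_order with
  | none => none
  | some order =>
    -- seen: set[str] = set(); ordered: list[str] = []; first loop over children_order
    let st1 : PySem.Set String × List String :=
      order.foldl (fun st child_id =>
        if child_id ∈ current_children ∧ child_id ∉ st.1 then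
          (PySem.Set.add st.1 child_id, st.2 ++ [child_id])
        else st) ((PySem.Set.empty : PySem.Set String), ([] : List String))
    -- second loop over current_children
    let st2 : PySem.Set String × List String :=
      current_children.foldl (fun st child_id =>
        if child_id ∉ st.1 then (PySem.Set.add st.1 child_id, st.2 ++ [child_id]) else st) st1
    if PySem.List.len st2.2 ≠ PySem.List.len current_children then none
    else some st2.2

-- ===== PORT B =====
def normalize_children_order_py_alt (children_order : Option (List String)) (current_children : List String) : Option (List String) :=
  match children_order with
  | none => none
  | some order =>
    -- if len(set(current_children)) != len(current_children): return None
    if PySem.Set.len (PySem.Set.ofList current_children) ≠ PySem.List.len current_children then none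
    else
      -- pos = {}; for cid in children_order: pos.setdefault(cid, len(pos))
      let pos1 : PySem.Dict String Int :=
        order.foldl (fun d cid => d.setdefault cid (d.size : Int)) PySem.Dict.empty
      -- for cid in current_children: pos.setdefault(cid, len(pos))
      let pos : PySem.Dict String Int :=
        current_children.foldl (fun d cid => d.setdefault cid (d.size : Int)) pos1
      -- sorted(current_children, key=lambda c: pos[c]); every id of current_children is a key
      -- of pos, so the getD default is never consulted (pos[c] cannot raise)
      some (PySem.List.sorted current_children (fun c => pos.getD c 0) false)

-- ===== PRECONDITION & SPEC =====
def Spec_normalize_children_order_py (children_order : Option (List String)) (current_children : List String) (out : Option (List String)) : Prop := out = normalize_children_order_py_alt children_order current_children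
instance (children_order : Option (List String)) (current_children : List String) (out : Option (List String)) : Decidable (Spec_normalize_children_order_py children_order current_children out) := by unfold Spec_normalize_children_order_py; infer_instance

-- ===== CLAIM (what is proved, stated in full; the proofs are below) =====
def Claim_equal_normalize_children_order_py : Prop := ∀ (children_order : Option (List String)) (current_children : List String), Dom_normalize_children_order_py children_order current_children → Spec_normalize_children_order_py children_order current_children (normalize_children_order_py children_order current_children)

-- ===== LEMMAS AND PROOFS =====

-- first occurrences of cs that lie in cur and are not yet seen (A's first loop, purely)
def ordA (cur : List String) : List String → List String → List String
  | [], _ => []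
  | c :: cs, s => if c ∈ cur ∧ c ∉ s then c :: ordA cur cs (s ++ [c]) else ordA cur cs s

-- first occurrences of cs not yet seen (A's second loop / set(xs) construction, purely)
def ordT : List String → List String → List String
  | [], _ => []
  | c :: cs, s => if c ∉ s then c :: ordT cs (s ++ [c]) else ordT cs s

-- the dict built by the setdefault loops: keys ks (distinct), value = position
def rankDict (ks : List String) : PySem.Dict String Int :=
  PySem.Dict.mk (ks.zipIdx.map (fun p => (p.1, (p.2 : Int))))

theorem loopA (cur : List String) (order : List String) : ∀ (s : PySem.Set String) (o : List String),
    order.foldl (fun st c => if c ∈ cur ∧ c ∉ st.1 then (PySem.Set.add st.1 c, st.2 ++ [c]) else st) (s, o)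
      = (s ++ ordA cur order s, o ++ ordA cur order s) := by
  induction order with
  | nil => intro s o; simp [ordA]
  | cons c cs ih =>
    intro s o
    by_cases h : c ∈ cur ∧ c ∉ s
    · simp only [List.foldl_cons, if_pos h, ordA, PySem.Set.add_of_not_mem h.2]
      rw [ih]; simp
    · simp only [List.foldl_cons, if_neg h, ordA]
      rw [ih]

theorem loopT (cs : List String) : ∀ (s : PySem.Set String) (o : List String),
    cs.foldl (fun st c => if c ∉ st.1 then (PySem.Set.add st.1 c, st.2 ++ [c]) else st) (s, o)
      = (s ++ ordT cs s, o ++ ordT cs s) := by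
  induction cs with
  | nil => intro s o; simp [ordT]
  | cons c cs ih =>
    intro s o
    by_cases h : c ∉ s
    · simp only [List.foldl_cons, if_pos h, ordT, PySem.Set.add_of_not_mem h]
      rw [ih]; simp
    · simp only [List.foldl_cons, if_neg h, ordT]
      rw [ih]

theorem mem_ordA (cur : List String) (order : List String) : ∀ (s : List String) (x : String),
    x ∈ ordA cur order s ↔ x ∈ order ∧ x ∈ cur ∧ x ∉ s := by
  induction order with
  | nil => intro s x; simp [ordA]
  | cons c cs ih =>
    intro s x
    by_cases h : c ∈ cur ∧ c ∉ s
    · simp only [ordA, if_pos h, List.mem_cons, ih]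
      constructor
      · rintro (rfl | ⟨hx, hc, hs⟩)
        · exact ⟨Or.inl rfl, h.1, h.2⟩
        · simp at hs; exact ⟨Or.inr hx, hc, hs.1⟩
      · rintro ⟨(rfl | hx), hc, hs⟩
        · exact Or.inl rfl
        · by_cases hxc : x = c
          · exact Or.inl hxc
          · exact Or.inr ⟨hx, hc, by simp [hs, hxc]⟩
    · simp only [ordA, if_neg h, ih, List.mem_cons]
      constructor
      · rintro ⟨hx, hc, hs⟩; exact ⟨Or.inr hx, hc, hs⟩
      · rintro ⟨(rfl | hx), hc, hs⟩
        · exact absurd ⟨hc, hs⟩ h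
        · exact ⟨hx, hc, hs⟩

theorem mem_ordT (cs : List String) : ∀ (s : List String) (x : String),
    x ∈ ordT cs s ↔ x ∈ cs ∧ x ∉ s := by
  induction cs with
  | nil => intro s x; simp [ordT]
  | cons c cs ih =>
    intro s x
    by_cases h : c ∉ s
    · simp only [ordT, if_pos h, List.mem_cons, ih]
      constructor
      · rintro (rfl | ⟨hx, hs⟩)
        · exact ⟨Or.inl rfl, h⟩
        · simp at hs; exact ⟨Or.inr hx, hs.1⟩
      · rintro ⟨(rfl | hx), hs⟩
        · exact Or.inl rfl
        · by_cases hxc : x = c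
          · exact Or.inl hxc
          · exact Or.inr ⟨hx, by simp [hs, hxc]⟩
    · simp only [ordT, if_neg h, ih, List.mem_cons]
      constructor
      · rintro ⟨hx, hs⟩; exact ⟨Or.inr hx, hs⟩
      · rintro ⟨(rfl | hx), hs⟩
        · simp at h; exact absurd h hs
        · exact ⟨hx, hs⟩

theorem nodup_append_ordA (cur : List String) (order : List String) : ∀ (s : List String), s.Nodup →
    (s ++ ordA cur order s).Nodup := by
  induction order with
  | nil => intro s hs; simpa [ordA]
  | cons c cs ih =>
    intro s hs
    by_cases h : c ∈ cur ∧ c ∉ s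
    · have := ih (s ++ [c]) (by
        refine List.nodup_append.mpr ⟨hs, List.nodup_singleton c, ?_⟩
        intro a ha b hb
        simp only [List.mem_singleton] at hb
        exact fun hab => h.2 ((hab.trans hb) ▸ ha))
      simp only [ordA, if_pos h]
      simpa [List.append_assoc] using this
    · simpa [ordA, if_neg h] using ih s hs

theorem nodup_append_ordT (cs : List String) : ∀ (s : List String), s.Nodup →
    (s ++ ordT cs s).Nodup := by
  induction cs with
  | nil => intro s hs; simpa [ordT]
  | cons c cs ih =>
    intro s hs
    by_cases h : c ∉ s
    · have := ih (s ++ [c]) (by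
        refine List.nodup_append.mpr ⟨hs, List.nodup_singleton c, ?_⟩
        intro a ha b hb
        simp only [List.mem_singleton] at hb
        exact fun hab => h ((hab.trans hb) ▸ ha))
      simp only [ordT, if_pos h]
      simpa [List.append_assoc] using this
    · simpa [ordT, if_neg h] using ih s hs

-- A's first loop is the cur-filter of the plain first-occurrence pass
theorem ordA_eq_filter_ordT (cur : List String) (cs : List String) : ∀ (s t : List String),
    (∀ x ∈ cur, (x ∈ s ↔ x ∈ t)) →
    ordA cur cs s = (ordT cs t).filter (fun c => decide (c ∈ cur)) := by
  induction cs with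
  | nil => intro s t _; simp [ordA, ordT]
  | cons c cs ih =>
    intro s t H
    by_cases hc : c ∈ cur
    · by_cases hcs : c ∈ s
      · have hct : c ∈ t := (H c hc).mp hcs
        simp only [ordA, ordT, if_neg (not_not_intro hct), if_neg (by simp [hcs] : ¬(c ∈ cur ∧ c ∉ s))]
        exact ih s t H
      · have hct : c ∉ t := fun h => hcs ((H c hc).mpr h)
        simp only [ordA, ordT, if_pos (⟨hc, hcs⟩ : c ∈ cur ∧ c ∉ s), if_pos hct]
        rw [List.filter_cons, if_pos (by simpa using hc)]
        exact congrArg (c :: ·) (ih (s ++ [c]) (t ++ [c]) (fun x hx => by simp [H x hx]))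
    · by_cases hct : c ∈ t
      · simp only [ordA, ordT, if_neg (by simp [hc] : ¬(c ∈ cur ∧ c ∉ s)), if_neg (not_not_intro hct)]
        exact ih s t H
      · simp only [ordA, ordT, if_neg (by simp [hc] : ¬(c ∈ cur ∧ c ∉ s)), if_pos hct]
        rw [List.filter_cons, if_neg (by simpa using hc)]
        exact ih s (t ++ [c]) (fun x hx => by
          have : x ≠ c := fun h => hc (h ▸ hx)
          simp [H x hx, this])

theorem ordT_congr (cs : List String) : ∀ (s t : List String),
    (∀ x ∈ cs, (x ∈ s ↔ x ∈ t)) → ordT cs s = ordT cs t := by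
  induction cs with
  | nil => intro s t _; simp [ordT]
  | cons c cs ih =>
    intro s t H
    have hc := H c (by simp)
    by_cases h : c ∈ s
    · simp only [ordT, if_neg (not_not_intro h), if_neg (not_not_intro (hc.mp h))]
      exact ih s t (fun x hx => H x (by simp [hx]))
    · have h' : c ∉ t := fun hh => h (hc.mpr hh)
      simp only [ordT, if_pos h, if_pos h']
      rw [ih (s ++ [c]) (t ++ [c]) (fun x hx => by simp [H x (by simp [hx])])]

theorem ordT_eq_filter (cs : List String) : ∀ (s : List String), cs.Nodup →
    ordT cs s = cs.filter (fun c => decide (c ∉ s)) := by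
  induction cs with
  | nil => intro s _; simp [ordT]
  | cons c cs ih =>
    intro s hn
    have hcn : c ∉ cs := (List.nodup_cons.mp hn).1
    by_cases h : c ∈ s
    · simp only [ordT, if_neg (not_not_intro h)]
      rw [List.filter_cons, if_neg (by simpa using not_not_intro h)]
      exact ih s (List.nodup_cons.mp hn).2
    · simp only [ordT, if_pos h]
      rw [List.filter_cons, if_pos (by simpa using h)]
      rw [ordT_congr cs (s ++ [c]) s (fun x hx => by
        have : x ≠ c := fun hh => hcn (hh ▸ hx)
        simp [this]), ih s (List.nodup_cons.mp hn).2]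

-- building a set by repeated add is the first-occurrence pass
theorem foldl_add_eq (l : List String) : ∀ (s : PySem.Set String),
    l.foldl PySem.Set.add s = s ++ ordT l s := by
  induction l with
  | nil => intro s; simp [ordT]
  | cons c cs ih =>
    intro s
    by_cases h : c ∈ s
    · simp only [List.foldl_cons, PySem.Set.add_of_mem h, ordT, if_neg (not_not_intro h)]
      exact ih s
    · simp only [List.foldl_cons, PySem.Set.add_of_not_mem h, ordT, if_pos h]
      rw [ih (s ++ [c])]
      simp

-- set(xs) as the first-occurrence pass
theorem ofList_eq_ordT (l : List String) : PySem.Set.ofList l = ordT l [] := by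
  rw [PySem.Set.ofList_eq_foldl, foldl_add_eq]
  simp

-- rankDict basics
theorem rankDict_keys (ks : List String) : (rankDict ks).keys = ks := by
  simp [rankDict, PySem.Dict.keys, List.map_map, Function.comp_def, List.zipIdx_map_fst]

theorem rankDict_size (ks : List String) : (rankDict ks).size = ks.length := by
  simp [rankDict, PySem.Dict.size]

theorem rankDict_contains (ks : List String) (c : String) :
    (rankDict ks).contains c = decide (c ∈ ks) := by
  rw [PySem.Dict.contains_eq_decide_mem_keys, rankDict_keys]

theorem rankDict_append (ks : List String) (c : String) :
    rankDict (ks ++ [c]) = PySem.Dict.mk ((rankDict ks).items ++ [(c, (ks.length : Int))]) := by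
  simp [rankDict, List.zipIdx_append]

theorem foldl_setdefault (l : List String) : ∀ (ks : List String),
    l.foldl (fun d cid => d.setdefault cid (d.size : Int)) (rankDict ks)
      = rankDict (PySem.Set.update ks l) := by
  induction l with
  | nil => intro ks; simp [PySem.Set.update]
  | cons c cs ih =>
    intro ks
    by_cases h : c ∈ ks
    · simp only [List.foldl_cons, PySem.Dict.setdefault, rankDict_contains, decide_eq_true h,
        PySem.Set.update_cons, PySem.Set.add_of_mem h]
      exact ih ks
    · simp only [List.foldl_cons, PySem.Dict.setdefault, rankDict_contains, decide_eq_false h,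
        PySem.Set.update_cons, PySem.Set.add_of_not_mem h]
      rw [if_neg (by simp), rankDict_size, ← rankDict_append]
      exact ih (ks ++ [c])

theorem get?_zipIdx (ks : List String) : ∀ (n : Nat) (c : String), c ∈ ks →
    (PySem.Dict.mk ((ks.zipIdx n).map (fun p => (p.1, (p.2 : Int))))).get? c
      = some (((n + ks.idxOf c : Nat) : Int)) := by
  induction ks with
  | nil => intro n c hc; simp at hc
  | cons k ks ih =>
    intro n c hc
    rw [List.zipIdx_cons, List.map_cons, PySem.Dict.get?_mk_cons]
    by_cases h : k = c
    · subst h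
      simp [List.idxOf_cons_self]
    · rw [if_neg (by simpa using h)]
      have hc' : c ∈ ks := by
        rcases List.mem_cons.mp hc with h' | h'
        · exact absurd h'.symm h
        · exact h'
      rw [ih (n + 1) c hc']
      have : List.idxOf c (k :: ks) = ks.idxOf c + 1 := List.idxOf_cons_ne ks (by simpa using h)
      rw [this]
      congr 1
      omega

theorem rankDict_getD (ks : List String) (c : String) (hc : c ∈ ks) :
    (rankDict ks).getD c 0 = (ks.idxOf c : Int) := by
  rw [PySem.Dict.getD_eq_get?_getD]
  have := get?_zipIdx ks 0 c hc
  rw [show rankDict ks = PySem.Dict.mk ((ks.zipIdx 0).map (fun p => (p.1, (p.2 : Int)))) from rfl, this]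
  simp

theorem nodup_pairwise_idxOf (K : List String) (hK : K.Nodup) :
    K.Pairwise (fun a b => K.idxOf a < K.idxOf b) := by
  rw [List.pairwise_iff_getElem]
  intro i j hi hj hij
  rw [List.Nodup.idxOf_getElem hK i hi, List.Nodup.idxOf_getElem hK j hj]
  exact hij

-- length of PySem.Set.ofList vs duplicates
theorem ofList_sublist (l : List String) : (PySem.Set.ofList l).Sublist l := by
  induction l with
  | nil => simp
  | cons x xs ih =>
    rw [PySem.Set.ofList_cons]
    have hd : (PySem.Set.discard (PySem.Set.ofList xs) x).Sublist (PySem.Set.ofList xs) := by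
      rw [PySem.Set.discard]
      exact List.filter_sublist
    exact List.Sublist.cons₂ x (hd.trans ih)

theorem ofList_length_eq_iff (l : List String) :
    (PySem.Set.ofList l).length = l.length ↔ l.Nodup := by
  constructor
  · intro h
    have := (ofList_sublist l).eq_of_length h
    rw [← this]
    exact PySem.Set.nodup_ofList l
  · intro h
    rw [PySem.Set.ofList_eq_self_of_nodup l h]

-- the key function B sorts by: position in K := first occurrences of order then of cur
theorem sorted_eq_ordered (order cur : List String) (hnd : cur.Nodup) :
    PySem.List.sorted cur
        (fun c => (rankDict (PySem.Set.update (PySem.Set.ofList order) cur)).getD c 0) false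
      = ordA cur order [] ++ ordT cur (ordA cur order []) := by
  have hLnd : (ordA cur order []).Nodup := by
    simpa using nodup_append_ordA cur order [] (by simp)
  have hond : ((ordA cur order []) ++ ordT cur (ordA cur order [])).Nodup :=
    nodup_append_ordT cur (ordA cur order []) hLnd
  have hmemL : ∀ x, x ∈ ordA cur order [] ↔ x ∈ order ∧ x ∈ cur := by
    intro x; simpa using mem_ordA cur order [] x
  have hmemord : ∀ x, x ∈ (ordA cur order []) ++ ordT cur (ordA cur order []) ↔ x ∈ cur := by
    intro x
    simp only [List.mem_append, mem_ordT, hmemL]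
    constructor
    · rintro (⟨_, h⟩ | ⟨h, _⟩) <;> exact h
    · intro h
      by_cases ho : x ∈ order
      · exact Or.inl ⟨ho, h⟩
      · exact Or.inr ⟨h, fun hl => ho hl.1⟩
  have hperm : ((ordA cur order []) ++ ordT cur (ordA cur order [])).Perm cur := by
    refine (List.perm_ext_iff_of_nodup hond hnd).mpr ?_
    intro a; exact hmemord a
  have hKnd : (PySem.Set.update (PySem.Set.ofList order) cur).Nodup :=
    PySem.Set.nodup_update _ _ (PySem.Set.nodup_ofList order)
  -- ordered is a sublist of K
  have hKeq : PySem.Set.update (PySem.Set.ofList order) cur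
      = PySem.Set.ofList order ++ cur.filter (fun y => !(PySem.Set.contains (PySem.Set.ofList order) y)) := by
    rw [PySem.Set.update_eq_append_filter, PySem.Set.ofList_eq_self_of_nodup cur hnd]
  have hLeq : ordA cur order [] = (PySem.Set.ofList order).filter (fun c => decide (c ∈ cur)) := by
    rw [ofList_eq_ordT]
    exact ordA_eq_filter_ordT cur order [] [] (by simp)
  have hTeq : ordT cur (ordA cur order [])
      = cur.filter (fun y => !(PySem.Set.contains (PySem.Set.ofList order) y)) := by
    rw [ordT_eq_filter cur (ordA cur order []) hnd]
    refine List.filter_congr ?_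
    intro x hx
    by_cases ho : x ∈ order
    · have h1 : x ∈ ordA cur order [] := (hmemL x).mpr ⟨ho, hx⟩
      have h2 : PySem.Set.contains (PySem.Set.ofList order) x = true := by
        simp [PySem.Set.contains_eq_listContains, PySem.Set.mem_ofList, ho]
      simp [h1, h2, ho]
    · have h1 : x ∉ ordA cur order [] := fun hl => ho ((hmemL x).mp hl).1
      have h2 : PySem.Set.contains (PySem.Set.ofList order) x = false := by
        simp [PySem.Set.contains_eq_listContains, PySem.Set.mem_ofList, ho]
      simp [h1, h2, ho]
  have hsub : ((ordA cur order []) ++ ordT cur (ordA cur order [])).Sublist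
      (PySem.Set.update (PySem.Set.ofList order) cur) := by
    rw [hKeq, hTeq, hLeq]
    exact List.Sublist.append List.filter_sublist (List.Sublist.refl _)
  have hpairOrd : ((ordA cur order []) ++ ordT cur (ordA cur order [])).Pairwise
      (fun a b => (PySem.Set.update (PySem.Set.ofList order) cur).idxOf a
                < (PySem.Set.update (PySem.Set.ofList order) cur).idxOf b) :=
    List.Pairwise.sublist hsub (nodup_pairwise_idxOf _ hKnd)
  have hpair : ((ordA cur order []) ++ ordT cur (ordA cur order [])).Pairwise
      (fun a b => (rankDict (PySem.Set.update (PySem.Set.ofList order) cur)).getD a 0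
                < (rankDict (PySem.Set.update (PySem.Set.ofList order) cur)).getD b 0) := by
    refine List.Pairwise.imp_of_mem ?_ hpairOrd
    intro a b ha hb hlt
    have haK : a ∈ PySem.Set.update (PySem.Set.ofList order) cur :=
      (PySem.Set.mem_update _ _ _).mpr (Or.inr ((hmemord a).mp ha))
    have hbK : b ∈ PySem.Set.update (PySem.Set.ofList order) cur :=
      (PySem.Set.mem_update _ _ _).mpr (Or.inr ((hmemord b).mp hb))
    rw [rankDict_getD _ a haK, rankDict_getD _ b hbK]
    exact_mod_cast hlt
  exact PySem.List.sorted_eq_of_perm_of_pairwise_lt cur _ _ hperm hpair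

-- the central lemma: both ports agree for some order
theorem main_eq (order cur : List String) :
    normalize_children_order_py (some order) cur = normalize_children_order_py_alt (some order) cur := by
  simp only [normalize_children_order_py, normalize_children_order_py_alt]
  rw [loopA cur order PySem.Set.empty []]
  have hempty : (PySem.Set.empty : PySem.Set String) = [] := rfl
  rw [hempty]
  simp only [List.nil_append]
  rw [loopT cur (ordA cur order []) (ordA cur order [])]
  -- A's length test equals B's duplicate test
  have hLnd : (ordA cur order []).Nodup := by
    simpa using nodup_append_ordA cur order [] (by simp)
  have hond : ((ordA cur order []) ++ ordT cur (ordA cur order [])).Nodup :=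
    nodup_append_ordT cur (ordA cur order []) hLnd
  have hmemord : ∀ x, x ∈ (ordA cur order []) ++ ordT cur (ordA cur order []) ↔ x ∈ cur := by
    intro x
    simp only [List.mem_append, mem_ordT]
    constructor
    · rintro (h | ⟨h, _⟩)
      · exact ((mem_ordA cur order [] x).mp (by simpa using h)).2.1
      · exact h
    · intro h
      by_cases ho : x ∈ order
      · exact Or.inl ((mem_ordA cur order [] x).mpr (by simp [ho, h]))
      · exact Or.inr ⟨h, fun hl => ho ((mem_ordA cur order [] x).mp (by simpa using hl)).1⟩
  have hlen : ((ordA cur order []) ++ ordT cur (ordA cur order [])).length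
      = (PySem.Set.ofList cur).length := by
    refine List.Perm.length_eq ?_
    refine (List.perm_ext_iff_of_nodup hond (PySem.Set.nodup_ofList cur)).mpr ?_
    intro a
    rw [hmemord a, PySem.Set.mem_ofList]
  have hcond : PySem.List.len ((ordA cur order []) ++ ordT cur (ordA cur order []))
      = PySem.Set.len (PySem.Set.ofList cur) := by
    simp [PySem.List.len, PySem.Set.len, hlen]
  rw [hcond]
  -- the two setdefault loops build the rank dictionary over K
  have hpos1 : order.foldl (fun d cid => d.setdefault cid ((d.size : Int))) PySem.Dict.empty
      = rankDict (PySem.Set.ofList order) := by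
    have h0 : (PySem.Dict.empty : PySem.Dict String Int) = rankDict [] := rfl
    rw [h0, foldl_setdefault, PySem.Set.update_nil_left]
  have hpos : cur.foldl (fun d cid => d.setdefault cid ((d.size : Int)))
        (rankDict (PySem.Set.ofList order))
      = rankDict (PySem.Set.update (PySem.Set.ofList order) cur) := foldl_setdefault cur _
  rw [hpos1, hpos]
  by_cases h : PySem.Set.len (PySem.Set.ofList cur) ≠ PySem.List.len cur
  · rw [if_pos h, if_pos h]
  · rw [if_neg h, if_neg h]
    have hnd : cur.Nodup := by
      rw [← ofList_length_eq_iff]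
      have : PySem.Set.len (PySem.Set.ofList cur) = PySem.List.len cur := not_not.mp h
      simpa [PySem.Set.len, PySem.List.len] using this
    rw [sorted_eq_ordered order cur hnd]

-- ===== VERDICT (by name: the statement is the Claim_ definition above) =====
theorem normalize_children_order_py_spec : Claim_equal_normalize_children_order_py := by
  intro co cur _
  unfold Spec_normalize_children_order_py
  cases co with
  | none => rfl
  | some order => exact main_eq order cur
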